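-- pv_equiv track=rewrite | github.com/alexpradap/python_coursera | Semana 4/analizar_texto.py | analizar_texto
-- ===== SOURCE A (Python) =====
-- def appareances(texto: str, palabra: str) -> tuple:
--     count = 0
--     first = None
--     last = None
--
--     len_texto = len(texto)
--     len_palabra = len(palabra)
--     for x in range(0, len_texto):
--         if palabra == texto[x:x + len_palabra]:
--             count = count + 1
--             last = x
--             if first == None:
--                 first = last
--     return (count, first, last)
--
-- def analizar_texto(texto: str, caracteres_permitidos: list) -> dict:
--     lista_palabras = []
--     ini = 0
--     for i in range(0, len(texto)):
--         if  caracteres_permitidos.count(texto[i]) == 0: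
--             lista_palabras.append(texto[ini:i])
--             ini = i + 1
--         if (i == len(texto) - 1):
--             lista_palabras.append(texto[ini:i + 1])
--
--     diccionario_palabras = {}
--
--     for palabra in lista_palabras:
--         diccionario_palabras[palabra.casefold()] = appareances(texto, palabra)
--
--     return diccionario_palabras
-- ===== SOURCE B (Python) =====
-- def analizar_texto(texto: str, caracteres_permitidos: list) -> dict:
--     permitidos = set(caracteres_permitidos)
--     palabras = []
--     actual = ''
--     for ch in texto:
--         if ch in permitidos:
--             actual += ch
--         else:
--             palabras.append(actual)
--             actual = ''
--     if texto:
--         palabras.append(actual)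
--
--     cache = {}
--     resultado = {}
--     for palabra in palabras:
--         if palabra not in cache:
--             posiciones = [x for x in range(len(texto))
--                           if texto.startswith(palabra, x)]
--             cache[palabra] = (len(posiciones),
--                               posiciones[0] if posiciones else None,
--                               posiciones[-1] if posiciones else None)
--         resultado[palabra.casefold()] = cache[palabra]
--     return resultado
-- ===== Notes on version B (the rewrite author's own statement) =====
-- stated objective: faster
-- what changed: B tokenizes with a single buffered pass over the text using a set of permitted characters (instead of slicing with list.count per index), memoizes the per-word scan in a cache so duplicate words are scanned once, and computes each word's (count, first, last) from one list of match positions via len/[0]/[-1] instead of A's accumulator loop with slice comparisons.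
import Mathlib
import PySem

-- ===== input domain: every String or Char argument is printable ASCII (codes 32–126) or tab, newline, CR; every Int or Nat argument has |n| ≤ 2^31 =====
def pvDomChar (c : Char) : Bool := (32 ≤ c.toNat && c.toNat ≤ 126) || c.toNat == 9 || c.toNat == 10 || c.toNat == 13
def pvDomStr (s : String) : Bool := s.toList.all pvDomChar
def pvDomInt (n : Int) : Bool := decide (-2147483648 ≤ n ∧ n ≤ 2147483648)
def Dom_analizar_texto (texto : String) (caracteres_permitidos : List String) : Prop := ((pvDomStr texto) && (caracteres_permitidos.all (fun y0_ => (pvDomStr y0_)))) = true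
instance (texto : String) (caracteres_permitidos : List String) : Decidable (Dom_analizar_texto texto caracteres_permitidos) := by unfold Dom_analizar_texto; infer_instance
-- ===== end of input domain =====

-- B replaces A's rescans by buffer tokenization over a set, a memo cache for duplicate words, and one
-- match-position list per distinct word (objective: faster; measured). casefold is ported as ASCII lower,
-- exact on the stated ASCII domain.

-- ===== PORT A =====
-- appareances(texto, palabra): x over range(len(texto)), slice comparison, accumulators (count, first, last)
def appareancesA (texto palabra : List Char) : Int × Option Int × Option Int :=
  let len_texto : Int := PySem.List.len texto
  let len_palabra : Int := PySem.List.len palabra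
  (PySem.List.pyRange 0 len_texto 1).foldl
    (fun (s : Int × Option Int × Option Int) x =>
      if palabra == PySem.List.slice texto (some x) (some (x + len_palabra)) then
        let count := s.1 + 1
        let last := some x
        let first := if s.2.1 = none then last else s.2.1
        (count, first, last)
      else s)
    ((0 : Int), (none : Option Int), (none : Option Int))

def analizar_texto (texto : String) (caracteres_permitidos : List String) : List (String × List (Option Int)) :=
  let t := texto.toList
  -- for i in range(0, len(texto)): two sequential ifs updating (lista_palabras, ini)
  let lista_palabras :=
    ((PySem.List.pyRange 0 (PySem.List.len t) 1).foldl
      (fun (s : List (List Char) × Int) i =>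
        let s := if PySem.List.count caracteres_permitidos (String.ofList [PySem.List.pyGetD t i ' ']) == 0
                 then (s.1 ++ [PySem.List.slice t (some s.2) (some i)], i + 1) else s
        if i == PySem.List.len t - 1
        then (s.1 ++ [PySem.List.slice t (some s.2) (some (i + 1))], s.2) else s)
      (([] : List (List Char)), (0 : Int))).1
  -- diccionario_palabras[palabra.casefold()] = appareances(texto, palabra)
  (lista_palabras.foldl
    (fun (d : PySem.Dict String (List (Option Int))) palabra =>
      let r := appareancesA t palabra
      d.insert (String.ofList (PySem.Chars.lower palabra)) [some r.1, r.2.1, r.2.2])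
    PySem.Dict.empty).items

-- ===== PORT B =====
-- positions of all occurrences, then closed forms: len / [0] / [-1]
def pvOccAlt (t w : List Char) : List (Option Int) :=
  let posiciones := (PySem.List.pyRange 0 (PySem.List.len t) 1).filter
      (fun x => PySem.Chars.startswith (PySem.List.slice t (some x) none) w)  -- texto.startswith(w, x), exact for 0 ≤ x
  [some (PySem.List.len posiciones), PySem.List.pyGet? posiciones 0, PySem.List.pyGet? posiciones (-1)]

def analizar_texto_alt (texto : String) (caracteres_permitidos : List String) : List (String × List (Option Int)) :=
  let t := texto.toList
  let permitidos := PySem.Set.ofList caracteres_permitidos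
  -- buffer tokenization: for ch in texto
  let p := t.foldl
    (fun (s : List (List Char) × List Char) ch =>
      if PySem.Set.contains permitidos (String.ofList [ch]) then (s.1, s.2 ++ [ch])
      else (s.1 ++ [s.2], ([] : List Char)))
    (([] : List (List Char)), ([] : List Char))
  let palabras := if t.isEmpty then p.1 else p.1 ++ [p.2]
  -- memo cache over duplicate words
  let r := palabras.foldl
    (fun (s : PySem.Dict (List Char) (List (Option Int)) × PySem.Dict String (List (Option Int))) palabra =>
      let cache := if s.1.contains palabra then s.1 else s.1.insert palabra (pvOccAlt t palabra)
      (cache, s.2.insert (String.ofList (PySem.Chars.lower palabra)) (cache.getD palabra [])))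
    (PySem.Dict.empty, PySem.Dict.empty)
  r.2.items

-- ===== PRECONDITION & SPEC =====
def Spec_analizar_texto (texto : String) (caracteres_permitidos : List String) (out : List (String × List (Option Int))) : Prop := out = analizar_texto_alt texto caracteres_permitidos
instance (texto : String) (caracteres_permitidos : List String) (out : List (String × List (Option Int))) : Decidable (Spec_analizar_texto texto caracteres_permitidos out) := by unfold Spec_analizar_texto; infer_instance

-- ===== CLAIM (what is proved, stated in full; the proofs are below) =====
def Claim_equal_analizar_texto : Prop := ∀ (texto : String) (caracteres_permitidos : List String), Dom_analizar_texto texto caracteres_permitidos → Spec_analizar_texto texto caracteres_permitidos (analizar_texto texto caracteres_permitidos)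

-- ===== LEMMAS AND PROOFS =====

-- proof-side names for the two tokenizers and the two dictionary loops (definitionally the ports' pieces)

def pvStepA (t : List Char) (perm : List String) (s : List (List Char) × Int) (i : Int) : List (List Char) × Int :=
  let s := if PySem.List.count perm (String.ofList [PySem.List.pyGetD t i ' ']) == 0
           then (s.1 ++ [PySem.List.slice t (some s.2) (some i)], i + 1) else s
  if i == PySem.List.len t - 1
  then (s.1 ++ [PySem.List.slice t (some s.2) (some (i + 1))], s.2) else s

def pvTokA (t : List Char) (perm : List String) : List (List Char) :=
  ((PySem.List.pyRange 0 (PySem.List.len t) 1).foldl (pvStepA t perm)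
    (([] : List (List Char)), (0 : Int))).1

def pvStepB (perm : List String) (s : List (List Char) × List Char) (ch : Char) : List (List Char) × List Char :=
  if PySem.Set.contains (PySem.Set.ofList perm) (String.ofList [ch]) then (s.1, s.2 ++ [ch])
  else (s.1 ++ [s.2], ([] : List Char))

def pvTokB (t : List Char) (perm : List String) : List (List Char) :=
  let p := t.foldl (pvStepB perm) (([] : List (List Char)), ([] : List Char))
  if t.isEmpty then p.1 else p.1 ++ [p.2]

def pvValA (t w : List Char) : List (Option Int) :=
  let r := appareancesA t w
  [some r.1, r.2.1, r.2.2]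

def pvDictA (t : List Char) (ws : List (List Char)) : List (String × List (Option Int)) :=
  (ws.foldl
    (fun (d : PySem.Dict String (List (Option Int))) palabra =>
      d.insert (String.ofList (PySem.Chars.lower palabra)) (pvValA t palabra))
    PySem.Dict.empty).items

def pvStepD (t : List Char)
    (s : PySem.Dict (List Char) (List (Option Int)) × PySem.Dict String (List (Option Int)))
    (palabra : List Char) :
    PySem.Dict (List Char) (List (Option Int)) × PySem.Dict String (List (Option Int)) :=
  let cache := if s.1.contains palabra then s.1 else s.1.insert palabra (pvOccAlt t palabra)
  (cache, s.2.insert (String.ofList (PySem.Chars.lower palabra)) (cache.getD palabra []))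

def pvDictB (t : List Char) (ws : List (List Char)) : List (String × List (Option Int)) :=
  ((ws.foldl (pvStepD t) (PySem.Dict.empty, PySem.Dict.empty)).2).items

-- 1. the two tokenizations agree --------------------------------------------------------------

theorem pvCond (perm : List String) (y : String) :
    (PySem.List.count perm y == 0) = !PySem.Set.contains (PySem.Set.ofList perm) y := by
  rw [Bool.eq_iff_iff]
  simp [PySem.List.count, PySem.Set.mem_ofList, List.count_eq_zero]

theorem pvTakeSucc (t : List Char) (a b : Nat) (hba : b ≤ a) (ha : a < t.length) :
    (t.drop b).take (a - b) ++ [t[a]] = (t.drop b).take (a + 1 - b) := by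
  have h1 : a + 1 - b = (a - b) + 1 := by omega
  rw [h1, List.take_add_one]
  have h2 : (t.drop b)[a - b]? = some t[a] := by
    rw [List.getElem?_drop, show b + (a - b) = a from by omega, List.getElem?_eq_getElem ha]
  rw [h2]
  rfl

theorem pvTokAux (t : List Char) (perm : List String) :
    ∀ (s : List Char) (a b : Nat) (L : List (List Char)),
      t.drop a = s → b ≤ a → s ≠ [] →
      ((PySem.List.pyRange (a : Int) (t.length : Int) 1).foldl (pvStepA t perm) (L, (b : Int))).1 =
        (let q := s.foldl (pvStepB perm) (L, (t.drop b).take (a - b)); q.1 ++ [q.2]) := by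
  intro s
  induction s with
  | nil => intro a b L _ _ h; exact absurd rfl h
  | cons x s' ih =>
    intro a b L hdrop hba _
    have hlen := congrArg List.length hdrop
    simp only [List.length_drop, List.length_cons] at hlen
    have ha : a < t.length := by omega
    have hx : t[a] = x := by
      have h0 : (t.drop a).head (by rw [hdrop]; simp) = x := by simp [hdrop]
      rwa [List.head_drop] at h0
    have hchar : PySem.List.pyGetD t (a : Int) ' ' = x := by
      rw [PySem.List.pyGetD_natCast, List.getD_eq_getElem t ' ' ha, hx]
    have hsl1 : PySem.List.slice t (some (b : Int)) (some (a : Int)) = (t.drop b).take (a - b) :=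
      PySem.List.slice_natCast t b a
    have hcast : ((a : Int) + 1) = ((a + 1 : Nat) : Int) := by push_cast; ring
    have hsl2 : PySem.List.slice t (some ((a : Int) + 1)) (some ((a : Int) + 1)) = [] := by
      rw [hcast, PySem.List.slice_natCast]; simp
    have hsl3 : PySem.List.slice t (some (b : Int)) (some ((a : Int) + 1)) = (t.drop b).take (a + 1 - b) := by
      rw [hcast, PySem.List.slice_natCast]
    have hdrop' : t.drop (a + 1) = s' := by
      rw [← List.tail_drop, hdrop]; rfl
    rw [PySem.List.pyRange_one_cons (by exact_mod_cast ha)]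
    simp only [List.foldl_cons]
    by_cases hc : PySem.Set.contains (PySem.Set.ofList perm) (String.ofList [x]) = true
    · -- allowed character: extend the current word
      have hcond : (PySem.List.count perm (String.ofList [x]) == 0) = false := by
        rw [pvCond, hc]; rfl
      rcases List.eq_nil_or_concat' s' with hs' | ⟨_, _, _⟩
      · -- last character of the text
        subst hs'
        have hlast : ((a : Int) == PySem.List.len t - 1) = true := by
          simp only [PySem.List.len_eq, beq_iff_eq]
          simp only [List.length_cons, List.length_nil] at hlen
          omega
        simp only [pvStepA, pvStepB, hchar, hcond, hlast, hc, Bool.false_eq_true, if_false,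
          if_true, List.foldl_cons, List.foldl_nil]
        have hnil : PySem.List.pyRange ((a : Int) + 1) (t.length : Int) 1 = [] := by
          apply PySem.List.pyRange_one_eq_nil
          simp only [List.length_nil] at hlen
          omega
        rw [hsl3, hnil, List.foldl_nil, ← hx, pvTakeSucc t a b hba ha]
      · -- not the last character
        have hne : s' ≠ [] := by rename_i h; rcases h with ⟨l, b', rfl⟩; simp
        have hlast : ((a : Int) == PySem.List.len t - 1) = false := by
          simp only [PySem.List.len_eq, beq_eq_false_iff_ne, ne_eq]
          have : s'.length ≠ 0 := by simpa using hne
          intro h; omega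
        simp only [pvStepA, pvStepB, hchar, hcond, hlast, hc, Bool.false_eq_true, if_false,
          if_true, List.foldl_cons]
        rw [hcast]
        have hih := ih (a + 1) b L hdrop' (by omega) hne
        rw [hih, ← hx, pvTakeSucc t a b hba ha]
    · -- separator: close the current word
      have hcond : (PySem.List.count perm (String.ofList [x]) == 0) = true := by
        rw [pvCond, Bool.eq_false_iff.mpr hc]; rfl
      rcases List.eq_nil_or_concat' s' with hs' | ⟨_, _, _⟩
      · subst hs'
        have hlast : ((a : Int) == PySem.List.len t - 1) = true := by
          simp only [PySem.List.len_eq, beq_iff_eq]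
          simp only [List.length_cons, List.length_nil] at hlen
          omega
        simp only [pvStepA, pvStepB, hchar, hcond, hlast, hc, Bool.false_eq_true, if_false,
          if_true, List.foldl_cons, List.foldl_nil]
        rw [hsl1, hsl2]
        have : PySem.List.pyRange ((a : Int) + 1) (t.length : Int) 1 = [] := by
          apply PySem.List.pyRange_one_eq_nil
          simp only [List.length_cons, List.length_nil] at hlen
          omega
        rw [this]
        rfl
      · have hne : s' ≠ [] := by rename_i h; rcases h with ⟨l, b', rfl⟩; simp
        have hlast : ((a : Int) == PySem.List.len t - 1) = false := by
          simp only [PySem.List.len_eq, beq_eq_false_iff_ne, ne_eq]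
          have : s'.length ≠ 0 := by simpa using hne
          intro h; omega
        simp only [pvStepA, pvStepB, hchar, hcond, hlast, hc, Bool.false_eq_true, if_false,
          if_true, List.foldl_cons]
        rw [hcast]
        have := ih (a + 1) (a + 1) (L ++ [PySem.List.slice t (some (b : Int)) (some (a : Int))])
          hdrop' (le_refl _) hne
        rw [this, hsl1]
        simp

theorem pvTokEq (t : List Char) (perm : List String) : pvTokA t perm = pvTokB t perm := by
  match t with
  | [] => rfl
  | c :: t'' =>
    have h := pvTokAux (c :: t'') perm (c :: t'') 0 0 [] (by simp) (le_refl 0) (by simp)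
    simp only [Nat.cast_zero, List.drop_zero, List.take_zero] at h
    unfold pvTokA pvTokB
    simp only [PySem.List.len_eq, List.isEmpty_cons, if_false, Bool.false_eq_true]
    exact h

-- 2. A's accumulator scan computes (length, head?, getLast?) of the match-position list ---------

theorem pvGetLastCons (x : Int) (m : List Int) : (x :: m).getLast? = m.getLast?.or (some x) := by
  induction m generalizing x with
  | nil => rfl
  | cons b bs ih => rw [List.getLast?_cons_cons, ih b, Option.or_assoc, Option.some_or]

theorem pvFoldMatches (P : Int → Bool) (l : List Int) (c : Int) (f la : Option Int) :
    l.foldl (fun s x => if P x then (s.1 + 1, (if s.2.1 = none then some x else s.2.1), some x) else s)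
      (c, f, la) =
    (c + ((l.filter P).length : Int), f.or (l.filter P).head?, ((l.filter P).getLast?).or la) := by
  induction l generalizing c f la with
  | nil => simp
  | cons x l ih =>
    simp only [List.foldl_cons, List.filter_cons]
    by_cases h : P x
    · simp only [h, if_pos]
      rw [ih]
      refine Prod.ext ?_ (Prod.ext ?_ ?_)
      · simp; ring
      · cases f <;> simp [Option.or]
      · simp only [pvGetLastCons, Option.or_assoc, Option.some_or]
    · simp only [h, ite_false, Bool.false_eq_true]
      exact ih c f la

theorem pvOccEq (t w : List Char) : pvValA t w = pvOccAlt t w := by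
  have hP : ∀ x ∈ PySem.List.pyRange 0 (t.length : Int) 1,
      (w == PySem.List.slice t (some x) (some (x + (w.length : Int)))) =
        PySem.Chars.startswith (PySem.List.slice t (some x) none) w := by
    intro x hx
    rw [PySem.List.mem_pyRange_one] at hx
    obtain ⟨hx0, hxn⟩ := hx
    rw [PySem.List.slice_toNat t hx0 (by positivity),
        show (x + (w.length : Int)).toNat - x.toNat = w.length from by omega,
        PySem.List.slice_from t hx0]
    rw [Bool.eq_iff_iff, beq_iff_eq, PySem.Chars.startswith_iff, List.prefix_iff_eq_take]
  simp only [pvValA, pvOccAlt, appareancesA, PySem.List.len_eq]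
  rw [pvFoldMatches, List.filter_congr hP]
  simp [PySem.List.pyGet?_zero, PySem.List.pyGet?_neg_one, List.head?_eq_getElem?]

-- 3. the memo-cached dictionary loop equals A's direct one --------------------------------------

theorem pvDictAux (t : List Char) (ws : List (List Char)) :
    ∀ (cache : PySem.Dict (List Char) (List (Option Int)))
      (res : PySem.Dict String (List (Option Int))),
      (∀ w v, cache.get? w = some v → v = pvOccAlt t w) →
      ws.foldl
        (fun (d : PySem.Dict String (List (Option Int))) palabra =>
          d.insert (String.ofList (PySem.Chars.lower palabra)) (pvOccAlt t palabra)) res =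
      (ws.foldl (pvStepD t) (cache, res)).2 := by
  induction ws with
  | nil => intro _ _ _; rfl
  | cons w ws ih =>
    intro cache res hinv
    simp only [List.foldl_cons, pvStepD]
    by_cases hcw : cache.contains w = true
    · simp only [hcw, if_true]
      have hv : cache.getD w [] = pvOccAlt t w := by
        have hs : (cache.get? w).isSome := by
          rw [← PySem.Dict.contains_eq_isSome_get?]; exact hcw
        obtain ⟨v, hv⟩ := Option.isSome_iff_exists.mp hs
        rw [PySem.Dict.getD_eq_get?_getD, hv]
        exact hinv w v hv
      rw [hv]
      exact ih cache _ hinv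
    · simp only [hcw, Bool.false_eq_true, if_false]
      have hv : (cache.insert w (pvOccAlt t w)).getD w [] = pvOccAlt t w :=
        PySem.Dict.getD_insert_self cache w (pvOccAlt t w) []
      rw [hv]
      refine ih _ _ ?_
      intro w' v hv'
      rw [PySem.Dict.get?_insert] at hv'
      split_ifs at hv' with hww
      · subst hww; exact (Option.some_inj.mp hv').symm
      · exact hinv w' v hv'

theorem pvDictEq (t : List Char) (ws : List (List Char)) : pvDictA t ws = pvDictB t ws := by
  unfold pvDictA pvDictB
  have hstep : (fun (d : PySem.Dict String (List (Option Int))) palabra =>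
        d.insert (String.ofList (PySem.Chars.lower palabra)) (pvValA t palabra)) =
      (fun (d : PySem.Dict String (List (Option Int))) palabra =>
        d.insert (String.ofList (PySem.Chars.lower palabra)) (pvOccAlt t palabra)) := by
    funext d w; rw [pvOccEq]
  rw [hstep]
  exact congrArg PySem.Dict.items
    (pvDictAux t ws PySem.Dict.empty PySem.Dict.empty
      (by intro w v hv; simp [PySem.Dict.get?_empty] at hv))

-- ===== VERDICT (by name: the statement is the Claim_ definition above) =====
theorem analizar_texto_spec : Claim_equal_analizar_texto := by
  intro texto perm _
  show analizar_texto texto perm = analizar_texto_alt texto perm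
  have h1 : analizar_texto texto perm = pvDictA texto.toList (pvTokA texto.toList perm) := rfl
  have h2 : analizar_texto_alt texto perm = pvDictB texto.toList (pvTokB texto.toList perm) := rfl
  rw [h1, h2, pvTokEq, pvDictEq]
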